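-- pv_equiv track=rewrite | github.com/MaksimShevtsov/RowQuery | row_query/core/sanitizer.py | _strip_comments_in_code
-- ===== SOURCE A (Python) =====
-- def _strip_comments_in_code(code: str) -> str:
--     """Remove ``--`` line comments and ``/* */`` block comments from a code segment."""
--     result: list[str] = []
--     i = 0
--     n = len(code)
--
--     while i < n:
--         if code[i : i + 2] == "--":
--             j = code.find("\n", i)
--             if j == -1:
--                 break
--             result.append("\n")
--             i = j + 1
--         elif code[i : i + 2] == "/*":
--             j = code.find("*/", i + 2)
--             if j == -1:
--                 break
--             result.append(" ")
--             i = j + 2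
--         else:
--             result.append(code[i])
--             i += 1
--
--     return "".join(result)
-- ===== SOURCE B (Python) =====
-- def _strip_comments_in_code(code: str) -> str:
--     """Remove ``--`` line comments and ``/* */`` block comments from a code segment."""
--     out = []
--     rest = code
--     while True:
--         a = rest.find("--")
--         b = rest.find("/*")
--         if a == -1 and b == -1:
--             out.append(rest)
--             break
--         if b == -1 or (a != -1 and a < b):
--             out.append(rest[:a])
--             j = rest.find("\n", a)
--             if j == -1:
--                 break
--             out.append("\n")
--             rest = rest[j + 1:]
--         else:
--             out.append(rest[:b])
--             j = rest.find("*/", b + 2)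
--             if j == -1:
--                 break
--             out.append(" ")
--             rest = rest[j + 2:]
--     return "".join(out)
-- ===== Notes on version B (the rewrite author's own statement) =====
-- stated objective: faster
-- what changed: Replaced A's character-by-character index scan (appending one character per loop iteration) by a delimiter-jumping loop: find the earliest comment opener in the remaining text with str.find, copy the whole clean prefix in one slice, skip past the comment, repeat.
import Mathlib
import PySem

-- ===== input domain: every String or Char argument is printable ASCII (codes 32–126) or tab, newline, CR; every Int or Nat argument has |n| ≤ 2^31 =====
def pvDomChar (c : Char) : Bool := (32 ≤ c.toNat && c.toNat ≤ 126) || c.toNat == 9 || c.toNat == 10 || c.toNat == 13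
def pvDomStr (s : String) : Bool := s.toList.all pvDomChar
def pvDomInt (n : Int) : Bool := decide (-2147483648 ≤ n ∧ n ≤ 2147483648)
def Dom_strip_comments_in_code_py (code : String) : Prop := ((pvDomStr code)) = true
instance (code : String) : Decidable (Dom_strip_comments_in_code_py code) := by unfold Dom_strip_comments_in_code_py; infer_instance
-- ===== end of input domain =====

-- B replaces A's character-by-character scan by a delimiter-jumping loop (find the
-- earliest comment opener, copy the clean prefix in one slice, skip the comment);
-- objective: faster (constant factor: one loop iteration per comment, not per character).

-- ===== PORT A =====
-- A scans one character at a time; its `code.find("\n", i)` / `code.find("*/", i+2)`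
-- are ported as searches over the suffix (the characters before i never match there:
-- search starts at i / i+2).
def pvAfterNL : List Char → Option (List Char)
  | [] => none
  | c :: cs => if c = '\n' then some cs else pvAfterNL cs

def pvAfterSS : List Char → Option (List Char)
  | c :: c2 :: cs => if c = '*' ∧ c2 = '/' then some cs else pvAfterSS (c2 :: cs)
  | _ => none

theorem pvAfterNL_len {cs r : List Char} (h : pvAfterNL cs = some r) :
    r.length < cs.length := by
  induction cs with
  | nil => simp [pvAfterNL] at h
  | cons c cs ih =>
    simp only [pvAfterNL] at h
    split at h
    · cases h; simp
    · have := ih h; simp; omega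

theorem pvAfterSS_len {cs r : List Char} (h : pvAfterSS cs = some r) :
    r.length < cs.length := by
  fun_induction pvAfterSS cs generalizing r
  · simp_all
  · rename_i c c2 cs hne ih
    have := ih h
    simp at this ⊢; omega
  · simp_all [pvAfterSS]

-- while-loop of A as structural recursion on the remaining suffix
def pvGoA : List Char → List Char
  | [] => []
  | c :: cs =>
    if c = '-' ∧ cs.head? = some '-' then
      match h : pvAfterNL cs with
      | none => []                      -- break
      | some r => '\n' :: pvGoA r
    else if c = '/' ∧ cs.head? = some '*' then
      match h : pvAfterSS (cs.drop 1) with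
      | none => []                      -- break
      | some r => ' ' :: pvGoA r
    else c :: pvGoA cs
termination_by l => l.length
decreasing_by
  · have := pvAfterNL_len h; simp; omega
  · have := pvAfterSS_len h; have h2 : (List.drop 1 cs).length = cs.length - 1 := by simp
    simp; omega
  · simp

def strip_comments_in_code_py (code : String) : String :=
  String.mk (pvGoA code.toList)

-- ===== PORT B =====
-- rest.find("--") / rest.find("/*") on the remaining suffix
def pvIdx2 (x y : Char) : List Char → Option Nat
  | c :: c2 :: cs =>
    if c = x ∧ c2 = y then some 0 else (pvIdx2 x y (c2 :: cs)).map (· + 1)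
  | _ => none

-- rest.find("\n", a) is ported as a search in the suffix `rest.drop a` (characters
-- before a are not at index ≥ a), likewise rest.find("*/", b+2).
def pvIdx1 (x : Char) : List Char → Option Nat
  | [] => none
  | c :: cs => if c = x then some 0 else (pvIdx1 x cs).map (· + 1)

theorem pvIdx2_le {x y : Char} {l : List Char} {a : Nat} (h : pvIdx2 x y l = some a) :
    a + 2 ≤ l.length := by
  fun_induction pvIdx2 x y l generalizing a
  · simp_all; omega
  · rename_i c c2 cs hne ih
    simp only [Option.map_eq_some_iff] at h
    obtain ⟨a', ha', rfl⟩ := h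
    have := ih ha'
    simp at this ⊢; omega
  · simp_all [pvIdx2]

-- while-loop of B as recursion on the remaining suffix `rest`
def pvGoB (l : List Char) : List Char :=
  match ha : pvIdx2 '-' '-' l, hb : pvIdx2 '/' '*' l with
  | none, none => l
  | some a, none =>
    match pvIdx1 '\n' (l.drop a) with
    | none => l.take a                  -- break
    | some j => l.take a ++ '\n' :: pvGoB ((l.drop a).drop (j + 1))
  | some a, some b =>
    if a < b then
      match pvIdx1 '\n' (l.drop a) with
      | none => l.take a                -- break
      | some j => l.take a ++ '\n' :: pvGoB ((l.drop a).drop (j + 1))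
    else
      match pvIdx2 '*' '/' (l.drop (b + 2)) with
      | none => l.take b                -- break
      | some j => l.take b ++ ' ' :: pvGoB ((l.drop (b + 2)).drop (j + 2))
  | none, some b =>
    match pvIdx2 '*' '/' (l.drop (b + 2)) with
    | none => l.take b                  -- break
    | some j => l.take b ++ ' ' :: pvGoB ((l.drop (b + 2)).drop (j + 2))
termination_by l.length
decreasing_by
  · have := pvIdx2_le ha; simp; omega
  · have := pvIdx2_le ha; simp; omega
  · have := pvIdx2_le hb; simp; omega
  · have := pvIdx2_le hb; simp; omega

def strip_comments_in_code_py_alt (code : String) : String :=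
  String.mk (pvGoB code.toList)

-- ===== PRECONDITION & SPEC =====
def Spec_strip_comments_in_code_py (code : String) (out : String) : Prop := out = strip_comments_in_code_py_alt code
instance (code : String) (out : String) : Decidable (Spec_strip_comments_in_code_py code out) := by unfold Spec_strip_comments_in_code_py; infer_instance

-- ===== CLAIM (what is proved, stated in full; the proofs are below) =====
def Claim_equal_strip_comments_in_code_py : Prop := ∀ (code : String), Dom_strip_comments_in_code_py code → Spec_strip_comments_in_code_py code (strip_comments_in_code_py code)

-- ===== LEMMAS AND PROOFS =====

theorem pvIdx2_cons {x y c : Char} {cs : List Char}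
    (h : ¬(c = x ∧ cs.head? = some y)) :
    pvIdx2 x y (c :: cs) = (pvIdx2 x y cs).map (· + 1) := by
  cases cs with
  | nil => simp [pvIdx2]
  | cons c2 rest =>
    have : ¬(c = x ∧ c2 = y) := by simp at h; intro hc; exact absurd hc.2 (h hc.1)
    simp [pvIdx2, this]

theorem pvAfterNL_eq (cs : List Char) :
    pvAfterNL cs = (pvIdx1 '\n' cs).map (fun j => cs.drop (j + 1)) := by
  induction cs with
  | nil => simp [pvAfterNL, pvIdx1]
  | cons c cs ih =>
    by_cases hc : c = '\n'
    · simp [pvAfterNL, pvIdx1, hc]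
    · simp [pvAfterNL, pvIdx1, hc, ih, Option.map_map]
      rfl

theorem pvAfterSS_eq (cs : List Char) :
    pvAfterSS cs = (pvIdx2 '*' '/' cs).map (fun j => cs.drop (j + 2)) := by
  induction cs with
  | nil => simp [pvAfterSS, pvIdx2]
  | cons c cs ih =>
    cases cs with
    | nil => simp [pvAfterSS, pvIdx2]
    | cons c2 rest =>
      by_cases hc : c = '*' ∧ c2 = '/'
      · simp [pvAfterSS, pvIdx2, hc]
      · simp [pvAfterSS, pvIdx2, hc, ih, Option.map_map]
        rfl

theorem pvGoB_eq' (l : List Char) :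
    pvGoB l =
      match pvIdx2 '-' '-' l, pvIdx2 '/' '*' l with
      | none, none => l
      | some a, none =>
        (match pvIdx1 '\n' (l.drop a) with
         | none => l.take a
         | some j => l.take a ++ '\n' :: pvGoB ((l.drop a).drop (j + 1)))
      | some a, some b =>
        if a < b then
          (match pvIdx1 '\n' (l.drop a) with
           | none => l.take a
           | some j => l.take a ++ '\n' :: pvGoB ((l.drop a).drop (j + 1)))
        else
          (match pvIdx2 '*' '/' (l.drop (b + 2)) with
           | none => l.take b
           | some j => l.take b ++ ' ' :: pvGoB ((l.drop (b + 2)).drop (j + 2)))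
      | none, some b =>
        (match pvIdx2 '*' '/' (l.drop (b + 2)) with
         | none => l.take b
         | some j => l.take b ++ ' ' :: pvGoB ((l.drop (b + 2)).drop (j + 2))) := by
  rw [pvGoB.eq_def]
  split <;> rename_i h1 h2 <;> simp [h1, h2]

theorem pvGoA_nil : pvGoA [] = [] := by
  rw [pvGoA]

theorem pvGoA_dash (cs : List Char) :
    pvGoA ('-' :: '-' :: cs) =
      (match pvAfterNL cs with
       | none => []
       | some r => '\n' :: pvGoA r) := by
  have hnl : pvAfterNL ('-' :: cs) = pvAfterNL cs := by simp [pvAfterNL]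
  rw [pvGoA]
  simp only [List.head?_cons, and_self, reduceIte]
  split <;> rename_i h <;> rw [hnl] at h <;> simp [h]

theorem pvGoA_slash (cs : List Char) :
    pvGoA ('/' :: '*' :: cs) =
      (match pvAfterSS cs with
       | none => []
       | some r => ' ' :: pvGoA r) := by
  rw [pvGoA]
  rw [if_neg (by simp), if_pos (by simp)]
  split <;> rename_i h <;> simp only [List.drop_succ_cons, List.drop_zero] at h <;> simp [h]

theorem pvGoA_other {c : Char} {cs : List Char}
    (h1 : ¬(c = '-' ∧ cs.head? = some '-')) (h2 : ¬(c = '/' ∧ cs.head? = some '*')) :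
    pvGoA (c :: cs) = c :: pvGoA cs := by
  rw [pvGoA]
  simp [h1, h2]

theorem pvGoB_cons {c : Char} {cs : List Char}
    (h1 : ¬(c = '-' ∧ cs.head? = some '-')) (h2 : ¬(c = '/' ∧ cs.head? = some '*')) :
    pvGoB (c :: cs) = c :: pvGoB cs := by
  rw [pvGoB_eq' (c :: cs), pvGoB_eq' cs]
  rw [pvIdx2_cons h1, pvIdx2_cons h2]
  cases ha : pvIdx2 '-' '-' cs <;> cases hb : pvIdx2 '/' '*' cs <;>
    simp only [Option.map_some, Option.map_none]
  · rename_i b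
    simp only [List.drop_succ_cons, show ∀ m : Nat, m + 1 + 2 = (m + 2) + 1 from fun m => rfl]
    cases hx : pvIdx2 '*' '/' (cs.drop (b + 2)) <;> simp [hx, List.take_succ_cons]
  · rename_i a
    simp only [List.drop_succ_cons]
    cases hx : pvIdx1 '\n' (cs.drop a) <;> simp [hx, List.take_succ_cons]
  · rename_i a b
    simp only [Nat.add_lt_add_iff_right, List.drop_succ_cons,
      show ∀ m : Nat, m + 1 + 2 = (m + 2) + 1 from fun m => rfl]
    by_cases hab : a < b
    · simp only [hab, reduceIte]
      cases hx : pvIdx1 '\n' (cs.drop a) <;> simp [hx, List.take_succ_cons]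
    · simp only [hab, reduceIte]
      cases hx : pvIdx2 '*' '/' (cs.drop (b + 2)) <;> simp [hx, List.take_succ_cons]

theorem pvGoB_eq_pvGoA (l : List Char) : pvGoB l = pvGoA l := by
  have key : ∀ n (l : List Char), l.length ≤ n → pvGoB l = pvGoA l := by
    intro n
    induction n with
    | zero =>
      intro l hl
      have : l = [] := by cases l <;> simp_all
      subst this
      rw [pvGoB_eq', pvGoA_nil]
      simp [pvIdx2]
    | succ n ih =>
      intro l hl
      cases l with
      | nil =>
        rw [pvGoB_eq', pvGoA_nil]
        simp [pvIdx2]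
      | cons c cs =>
        by_cases h1 : c = '-' ∧ cs.head? = some '-'
        · obtain ⟨rfl, hh⟩ := h1
          cases cs with
          | nil => simp at hh
          | cons c2 cs' =>
            simp only [List.head?_cons, Option.some.injEq] at hh
            subst hh
            rw [pvGoB_eq', pvGoA_dash]
            have hstep : pvIdx2 '/' '*' ('-' :: cs') = (pvIdx2 '/' '*' cs').map (· + 1) :=
              pvIdx2_cons (by simp)
            cases hcj : pvIdx1 '\n' cs' <;> cases hcb : pvIdx2 '/' '*' cs' <;>
              simp [pvIdx2, pvIdx1, pvAfterNL_eq, hstep, hcj, hcb] <;>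
              (apply ih; simp at hl ⊢; omega)
        · by_cases h2 : c = '/' ∧ cs.head? = some '*'
          · obtain ⟨rfl, hh⟩ := h2
            cases cs with
            | nil => simp at hh
            | cons c2 cs' =>
              simp only [List.head?_cons, Option.some.injEq] at hh
              subst hh
              rw [pvGoB_eq', pvGoA_slash]
              have hstep : pvIdx2 '-' '-' ('*' :: cs') = (pvIdx2 '-' '-' cs').map (· + 1) :=
                pvIdx2_cons (by simp)
              cases hca : pvIdx2 '-' '-' cs' <;> cases hcj : pvIdx2 '*' '/' cs' <;>
                simp [pvIdx2, pvIdx1, pvAfterSS_eq, hstep, hca, hcj] <;>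
                (apply ih; simp at hl ⊢; omega)
          · rw [pvGoB_cons h1 h2, pvGoA_other h1 h2]
            rw [ih _ (by simp at hl; omega)]
  exact key l.length l le_rfl

-- ===== VERDICT (by name: the statement is the Claim_ definition above) =====
theorem strip_comments_in_code_py_spec : Claim_equal_strip_comments_in_code_py := by
  intro code _
  unfold Spec_strip_comments_in_code_py strip_comments_in_code_py strip_comments_in_code_py_alt
  rw [pvGoB_eq_pvGoA]
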